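-- pv_equiv track=rewrite | github.com/donate110/sn103 | validator/djinn_validator/api/server.py | _detect_bot_challenge
-- ===== SOURCE A (Python) =====
-- def _detect_bot_challenge(response_body: str | None) -> bool:
--     """Check if a response body looks like a bot protection challenge page."""
--     if not response_body:
--         return False
--     lower = response_body[:4000].lower()
--     indicators = [
--         "<title>client challenge</title>",
--         "<title>just a moment...</title>",
--         "<title>attention required</title>",
--         "<title>access denied</title>",
--         "cf-challenge-running",
--         "cf_chl_opt",
--         "_cf_chl_tk",
--         "jschl_vc",
--         "jschl-answer",
--         "managed_checking_msg",
--         "challenges.cloudflare.com",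
--         "cdn-cgi/challenge-platform",
--         "please verify you are a human",
--         "checking your browser",
--         "ddos-guard",
--         "please wait while we verify",
--     ]
--     return any(ind in lower for ind in indicators)
-- ===== SOURCE B (Python) =====
-- _INDICATORS = [
--     "<title>client challenge</title>",
--     "<title>just a moment...</title>",
--     "<title>attention required</title>",
--     "<title>access denied</title>",
--     "cf-challenge-running",
--     "cf_chl_opt",
--     "_cf_chl_tk",
--     "jschl_vc",
--     "jschl-answer",
--     "managed_checking_msg",
--     "challenges.cloudflare.com",
--     "cdn-cgi/challenge-platform",
--     "please verify you are a human",
--     "checking your browser",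
--     "ddos-guard",
--     "please wait while we verify",
-- ]
--
--
-- def _detect_bot_challenge(response_body):
--     """Single left-to-right position scan: at each index, test whether any
--     indicator starts there (no per-indicator full rescan of the text)."""
--     if not response_body:
--         return False
--     lower = response_body[:4000].lower()
--     for i in range(len(lower)):
--         for ind in _INDICATORS:
--             if lower.startswith(ind, i):
--                 return True
--     return False
-- ===== Notes on version B (the rewrite author's own statement) =====
-- stated objective: alternative
-- what changed: A runs 16 independent whole-text substring scans, one per indicator; B makes a single left-to-right pass over positions, testing at each index whether any indicator starts there, so the text is traversed once.
import Mathlib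
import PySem

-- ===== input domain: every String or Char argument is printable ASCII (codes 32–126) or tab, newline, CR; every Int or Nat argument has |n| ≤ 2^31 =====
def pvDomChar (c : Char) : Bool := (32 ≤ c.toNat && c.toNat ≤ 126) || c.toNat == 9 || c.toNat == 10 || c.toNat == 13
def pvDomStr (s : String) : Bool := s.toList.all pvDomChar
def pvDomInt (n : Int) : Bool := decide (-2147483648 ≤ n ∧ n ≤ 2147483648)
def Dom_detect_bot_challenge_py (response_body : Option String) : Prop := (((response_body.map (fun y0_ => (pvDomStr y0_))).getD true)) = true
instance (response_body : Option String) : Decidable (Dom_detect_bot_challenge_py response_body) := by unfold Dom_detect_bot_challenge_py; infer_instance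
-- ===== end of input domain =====

-- B replaces A's 16 independent substring scans by one left-to-right position scan
-- that tests each indicator as a prefix at every index (alternative, same result).


-- ===== PORT A =====
-- the 16 indicator strings, in A's order
def pvIndicators : List String := [
  "<title>client challenge</title>",
  "<title>just a moment...</title>",
  "<title>attention required</title>",
  "<title>access denied</title>",
  "cf-challenge-running",
  "cf_chl_opt",
  "_cf_chl_tk",
  "jschl_vc",
  "jschl-answer",
  "managed_checking_msg",
  "challenges.cloudflare.com",
  "cdn-cgi/challenge-platform",
  "please verify you are a human",
  "checking your browser",
  "ddos-guard",
  "please wait while we verify"]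

def detect_bot_challenge_py (response_body : Option String) : Bool :=
  match response_body with
  | none => false
  | some s =>
    if s.toList.isEmpty then false
    else
      let lower := PySem.Chars.lower (PySem.List.slice s.toList none (some 4000))
      pvIndicators.any (fun ind => PySem.Chars.isIn ind.toList lower)

-- ===== PORT B =====
-- same indicator list, as character lists (Source B's _INDICATORS)
def pvIndsB : List (List Char) := pvIndicators.map String.toList

-- Source B's position loop: at each index test whether some indicator starts there
def pvScan (l : List Char) : Bool :=
  match l with
  | [] => false
  | _ :: t =>
    if pvIndsB.any (fun ind => ind.isPrefixOf l) then true else pvScan t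

def detect_bot_challenge_py_alt (response_body : Option String) : Bool :=
  match response_body with
  | none => false
  | some s =>
    if s.toList.isEmpty then false
    else pvScan (PySem.Chars.lower (PySem.List.slice s.toList none (some 4000)))

-- ===== PRECONDITION & SPEC =====
def Spec_detect_bot_challenge_py (response_body : Option String) (out : Bool) : Prop := out = detect_bot_challenge_py_alt response_body
instance (response_body : Option String) (out : Bool) : Decidable (Spec_detect_bot_challenge_py response_body out) := by unfold Spec_detect_bot_challenge_py; infer_instance

-- ===== CLAIM (what is proved, stated in full; the proofs are below) =====
def Claim_equal_detect_bot_challenge_py : Prop := ∀ (response_body : Option String), Dom_detect_bot_challenge_py response_body → Spec_detect_bot_challenge_py response_body (detect_bot_challenge_py response_body)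

-- ===== LEMMAS AND PROOFS =====

-- no indicator is the empty string
theorem pvIndsB_ne_nil : ∀ i ∈ pvIndsB, i ≠ [] := by decide

-- the position scan finds exactly the infix occurrences of some indicator
theorem pvScan_iff (l : List Char) : pvScan l = true ↔ ∃ i ∈ pvIndsB, i <:+: l := by
  induction l with
  | nil =>
    refine iff_of_false (by simp [pvScan]) ?_
    rintro ⟨i, hi, hinf⟩
    exact pvIndsB_ne_nil i hi (List.infix_nil.mp hinf)
  | cons c t ih =>
    simp only [pvScan]
    by_cases h : pvIndsB.any (fun ind => ind.isPrefixOf (c :: t)) = true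
    · simp only [h, if_true, true_iff]
      rcases List.any_eq_true.mp h with ⟨i, hi, hp⟩
      exact ⟨i, hi, (List.isPrefixOf_iff_prefix.mp hp).isInfix⟩
    · rw [if_neg h, ih]
      constructor
      · rintro ⟨i, hi, hinf⟩; exact ⟨i, hi, hinf.trans (List.infix_cons (List.infix_refl t))⟩
      · rintro ⟨i, hi, hinf⟩
        rcases (List.infix_cons_iff).mp hinf with hpre | hinf'
        · exact absurd (show (pvIndsB.any fun ind => ind.isPrefixOf (c :: t)) = true from
            List.any_eq_true.mpr ⟨i, hi, List.isPrefixOf_iff_prefix.mpr hpre⟩) h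
        · exact ⟨i, hi, hinf'⟩

-- A's any-of-16-substring-tests agrees with B's single scan on every text
theorem pvAny_eq_scan (l : List Char) :
    pvIndicators.any (fun ind => PySem.Chars.isIn ind.toList l) = pvScan l := by
  cases hb : pvScan l
  · rw [List.any_eq_false]
    intro s hs hcontra
    have hinf := (PySem.Chars.isIn_iff_infix _ _).mp hcontra
    have : pvScan l = true := (pvScan_iff l).mpr ⟨s.toList, List.mem_map_of_mem hs, hinf⟩
    simp [hb] at this
  · rcases (pvScan_iff l).mp hb with ⟨i, hi, hinf⟩
    rcases List.mem_map.mp hi with ⟨s, hs, rfl⟩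
    exact List.any_eq_true.mpr ⟨s, hs, (PySem.Chars.isIn_iff_infix _ _).mpr hinf⟩

-- ===== VERDICT (by name: the statement is the Claim_ definition above) =====
theorem detect_bot_challenge_py_spec : Claim_equal_detect_bot_challenge_py := by
  intro rb _
  unfold Spec_detect_bot_challenge_py detect_bot_challenge_py detect_bot_challenge_py_alt
  match rb with
  | none => rfl
  | some s =>
    by_cases h : s.toList.isEmpty
    · simp [h]
    · simp only [h]
      exact pvAny_eq_scan _
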